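-- pv_equiv track=rewrite | github.com/bymars/topcoder | srm689/SimilarUserDetection.py | haveSimilar
-- ===== SOURCE A (Python) =====
-- def haveSimilar(handles):
--     for i in range(0, len(handles)):
--         handles[i] = handles[i].replace('O', '0').replace('I', '1').replace('l', '1')
--     for i in range(0, len(handles)):
--         for j in range(i+1, len(handles)):
--             if handles[i] == handles[j]:
--                 return "Similar handles found"
--     return "Similar handles not found"
-- ===== SOURCE B (Python) =====
-- def haveSimilar(handles):
--     for i in range(0, len(handles)):
--         handles[i] = handles[i].replace('O', '0').replace('I', '1').replace('l', '1')
--     s = sorted(handles)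
--     for i in range(1, len(s)):
--         if s[i] == s[i - 1]:
--             return "Similar handles found"
--     return "Similar handles not found"
-- ===== Notes on version B (the rewrite author's own statement) =====
-- stated objective: alternative
-- what changed: Replaces A's nested all-pairs comparison with sort-then-adjacent-scan on a sorted copy of the normalized handles; the in-place normalization of the argument is kept.
import Mathlib
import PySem

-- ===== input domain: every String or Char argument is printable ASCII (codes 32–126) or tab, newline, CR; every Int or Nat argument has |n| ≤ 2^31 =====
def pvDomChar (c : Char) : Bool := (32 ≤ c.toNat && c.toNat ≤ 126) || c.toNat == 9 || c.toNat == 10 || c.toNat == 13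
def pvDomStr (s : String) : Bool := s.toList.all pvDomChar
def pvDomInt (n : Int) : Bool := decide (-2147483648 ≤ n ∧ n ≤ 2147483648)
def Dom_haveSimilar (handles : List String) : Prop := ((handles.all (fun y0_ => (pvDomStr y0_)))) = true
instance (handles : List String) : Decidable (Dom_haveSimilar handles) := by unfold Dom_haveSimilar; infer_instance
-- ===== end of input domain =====

-- B sorts a copy of the normalized handles and scans adjacent pairs instead of A's nested all-pairs scan;
-- the equivalence proved here is about the RETURN value only (both Pythons also normalize the argument
-- list in place identically).

-- ===== PORT A =====
-- normalization A's first loop applies to each handles[i]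
def normA (s : String) : String :=
  PySem.Str.replace (PySem.Str.replace (PySem.Str.replace s "O" "0") "I" "1") "l" "1"

-- A's nested loops: for each i, scan the suffix j > i for an element equal to handles[i]
def checkA : List String → String
  | [] => "Similar handles not found"
  | x :: rest => if rest.contains x then "Similar handles found" else checkA rest

def haveSimilar (handles : List String) : String :=
  checkA (handles.map normA)

-- ===== PORT B =====
def normB (s : String) : String :=
  PySem.Str.replace (PySem.Str.replace (PySem.Str.replace s "O" "0") "I" "1") "l" "1"

-- B's second loop: walk the sorted copy comparing each element with its predecessor
def adjScanB : List String → String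
  | a :: b :: t => if a = b then "Similar handles found" else adjScanB (b :: t)
  | _ => "Similar handles not found"

def haveSimilar_alt (handles : List String) : String :=
  adjScanB (PySem.List.sorted (handles.map normB) (fun x => x) false)

-- ===== PRECONDITION & SPEC =====
def Spec_haveSimilar (handles : List String) (out : String) : Prop := out = haveSimilar_alt handles
instance (handles : List String) (out : String) : Decidable (Spec_haveSimilar handles out) := by unfold Spec_haveSimilar; infer_instance

-- ===== CLAIM (what is proved, stated in full; the proofs are below) =====
def Claim_equal_haveSimilar : Prop := ∀ (handles : List String), Dom_haveSimilar handles → Spec_haveSimilar handles (haveSimilar handles)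

-- ===== LEMMAS AND PROOFS =====

-- A's pairwise scan answers "found" exactly when the list has a duplicate
lemma checkA_eq (l : List String) :
    checkA l = if l.Nodup then "Similar handles not found" else "Similar handles found" := by
  induction l with
  | nil => simp [checkA]
  | cons x t ih =>
      by_cases hx : x ∈ t
      · simp [checkA, hx, List.nodup_cons]
      · simp [checkA, hx, List.nodup_cons, ih]

-- B's adjacent scan on a ≤-sorted list answers "found" exactly when the list has a duplicate
lemma adjScanB_eq (l : List String) (hs : l.Pairwise (· ≤ ·)) :
    adjScanB l = if l.Nodup then "Similar handles not found" else "Similar handles found" := by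
  induction l with
  | nil => simp [adjScanB]
  | cons a t ih =>
      cases t with
      | nil => simp [adjScanB]
      | cons b u =>
          rcases List.pairwise_cons.mp hs with ⟨ha, hbt⟩
          by_cases hab : a = b
          · have : ¬ (a :: b :: u).Nodup := by
              simp [List.nodup_cons, hab]
            simp [adjScanB, hab]
          · have hna : a ∉ b :: u := by
              intro hmem
              rcases List.mem_cons.mp hmem with h | h
              · exact hab h
              · rcases List.pairwise_cons.mp hbt with ⟨hb, _⟩
                exact hab (le_antisymm (ha b (by simp)) (hb a h))
            have : (a :: b :: u).Nodup ↔ (b :: u).Nodup := by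
              simp [List.nodup_cons, hna]
            rw [show adjScanB (a :: b :: u) = adjScanB (b :: u) by simp [adjScanB, hab],
                ih hbt]
            by_cases hnd : (b :: u).Nodup <;> simp [hnd, this]

-- ===== VERDICT (by name: the statement is the Claim_ definition above) =====
theorem haveSimilar_spec : Claim_equal_haveSimilar := by
  intro handles _
  unfold Spec_haveSimilar haveSimilar haveSimilar_alt normA normB
  rw [checkA_eq, adjScanB_eq _ (PySem.List.sorted_pairwise _ _)]
  have hperm := PySem.List.sorted_perm (handles.map (fun s =>
    PySem.Str.replace (PySem.Str.replace (PySem.Str.replace s "O" "0") "I" "1") "l" "1"))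
    (fun x => x) false
  simp [hperm.nodup_iff]
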